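-- pv_equiv track=rewrite | github.com/qianlinyi/LeetCode-Python | LeetCode 2866 美丽塔 II.py | maximumSumOfHeights
-- ===== SOURCE A (Python) =====
-- from typing import List
--
-- def maximumSumOfHeights(maxHeights: List[int]) -> int:
--     n = len(maxHeights)
--     suf = [0] * (n + 1)
--     st = [n]
--     s = 0
--     for i in range(n - 1, -1, -1):
--         x = maxHeights[i]
--         while len(st) > 1 and x <= maxHeights[st[-1]]:
--             j = st.pop()
--             s -= maxHeights[j] * (st[-1] - j)
--         s += x * (st[-1] - i)
--         suf[i] = s
--         st.append(i)
--
--     ans = s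
--     st = [-1]
--     pre = 0
--     for i, x in enumerate(maxHeights):
--         while len(st) > 1 and x <= maxHeights[st[-1]]:
--             j = st.pop()
--             pre -= maxHeights[j] * (j - st[-1])
--         pre += x * (i - st[-1])
--         ans = max(ans, pre + suf[i + 1])
--         st.append(i)
--     return ans
-- ===== SOURCE B (Python) =====
-- from typing import List
--
-- def maximumSumOfHeights(maxHeights: List[int]) -> int:
--     # Brute force: try every index as the peak; heights fall off (running minimum)
--     # on both sides of it.  O(n^2), no stacks.
--     n = len(maxHeights)
--     best = None
--     for i in range(n):
--         cur = maxHeights[i]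
--         total = cur
--         for j in range(i - 1, -1, -1):
--             cur = min(cur, maxHeights[j])
--             total += cur
--         cur = maxHeights[i]
--         for j in range(i + 1, n):
--             cur = min(cur, maxHeights[j])
--             total += cur
--         if best is None or total > best:
--             best = total
--     return 0 if best is None else best
-- ===== Notes on version B (the rewrite author's own statement) =====
-- stated objective: alternative
-- what changed: Replaces the two monotonic-stack prefix/suffix sweeps with a direct per-peak brute force: for each index i as the peak, sum running minima leftward and rightward and take the maximum over all peaks.
import Mathlib
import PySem

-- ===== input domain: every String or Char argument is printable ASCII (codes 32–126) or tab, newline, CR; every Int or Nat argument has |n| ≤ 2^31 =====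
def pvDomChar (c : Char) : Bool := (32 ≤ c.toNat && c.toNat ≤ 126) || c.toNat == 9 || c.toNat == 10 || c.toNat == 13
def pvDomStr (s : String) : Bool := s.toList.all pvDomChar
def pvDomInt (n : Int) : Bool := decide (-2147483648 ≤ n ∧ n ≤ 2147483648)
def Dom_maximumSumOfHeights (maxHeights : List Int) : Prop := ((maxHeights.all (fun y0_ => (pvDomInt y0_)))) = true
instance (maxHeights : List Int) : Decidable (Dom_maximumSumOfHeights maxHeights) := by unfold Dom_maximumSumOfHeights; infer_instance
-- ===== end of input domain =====

-- B replaces A's two monotonic-stack sweeps by a per-peak running-minimum brute force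
-- (objective: alternative decomposition, not speed; B is O(n^2) to A's O(n)).

-- ===== PORT A =====
-- Port notes: every list read in A is in range, so xs[i] is PySem.List.pyGetD (exact here);
-- the Python stack st (top = st[-1]) is represented head-first (top = head), so
-- st[-1] is headD, st.pop drops the head and st.append(i) is i :: ·; the array suf,
-- written at position i while i descends from n-1 to 0, is built by prepending onto
-- [0] (its suf[n] cell), giving the same final array.  Each inner 'while' loop is the
-- recursive helper pvPopSuf / pvPopPre over the stack it shortens.
def pvPopSuf (h : List Int) (x : Int) : List Int → Int → List Int × Int
  | j :: t :: rest, s =>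
    if x ≤ PySem.List.pyGetD h j 0 then
      pvPopSuf h x (t :: rest) (s - PySem.List.pyGetD h j 0 * (t - j))
    else (j :: t :: rest, s)
  | st, s => (st, s)

def pvPopPre (h : List Int) (x : Int) : List Int → Int → List Int × Int
  | j :: t :: rest, pre =>
    if x ≤ PySem.List.pyGetD h j 0 then
      pvPopPre h x (t :: rest) (pre - PySem.List.pyGetD h j 0 * (j - t))
    else (j :: t :: rest, pre)
  | st, pre => (st, pre)

def maximumSumOfHeights (maxHeights : List Int) : Int :=
  let n : Int := maxHeights.length
  let s1 : List Int × Int × List Int :=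
    (PySem.List.pyRange (n - 1) (-1) (-1)).foldl
      (fun acc i =>
        let x := PySem.List.pyGetD maxHeights i 0
        let ps := pvPopSuf maxHeights x acc.1 acc.2.1
        let s' := ps.2 + x * (ps.1.headD 0 - i)
        (i :: ps.1, s', s' :: acc.2.2))
      ([n], 0, [0])
  let suf := s1.2.2
  let s2 : List Int × Int × Int :=
    (PySem.List.enumerate maxHeights).foldl
      (fun acc p =>
        let pp := pvPopPre maxHeights p.2 acc.1 acc.2.1
        let pre' := pp.2 + p.2 * (p.1 - pp.1.headD 0)
        let ans' := max acc.2.2 (pre' + PySem.List.pyGetD suf (p.1 + 1) 0)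
        (p.1 :: pp.1, pre', ans'))
      ([-1], 0, s1.2.1)
  s2.2.2

-- ===== PORT B =====
def maximumSumOfHeights_alt (maxHeights : List Int) : Int :=
  let n : Int := maxHeights.length
  let best :=
    (PySem.List.pyRange 0 n 1).foldl
      (fun (best : Option Int) i =>
        let x := PySem.List.pyGetD maxHeights i 0
        let l := (PySem.List.pyRange (i - 1) (-1) (-1)).foldl
          (fun (a : Int × Int) j =>
            let cur := min a.1 (PySem.List.pyGetD maxHeights j 0)
            (cur, a.2 + cur)) (x, x)
        let r := (PySem.List.pyRange (i + 1) n 1).foldl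
          (fun (a : Int × Int) j =>
            let cur := min a.1 (PySem.List.pyGetD maxHeights j 0)
            (cur, a.2 + cur)) (x, l.2)
        match best with
        | none => some r.2
        | some b => if r.2 > b then some r.2 else some b)
      none
  best.getD 0

-- ===== PRECONDITION & SPEC =====
def Spec_maximumSumOfHeights (maxHeights : List Int) (out : Int) : Prop := out = maximumSumOfHeights_alt maxHeights
instance (maxHeights : List Int) (out : Int) : Decidable (Spec_maximumSumOfHeights maxHeights out) := by unfold Spec_maximumSumOfHeights; infer_instance

-- ===== CLAIM (what is proved, stated in full; the proofs are below) =====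
def Claim_equal_maximumSumOfHeights : Prop := ∀ (maxHeights : List Int), Dom_maximumSumOfHeights maxHeights → Spec_maximumSumOfHeights maxHeights (maximumSumOfHeights maxHeights)

-- ===== LEMMAS AND PROOFS =====

-- h[k] as a total function on Nat indices (all reads below are in range).
def pvIdx (h : List Int) (k : ℕ) : Int := h.getD k 0

-- minimum of h[a..b] (a ≤ b)
def pvM (h : List Int) (a b : ℕ) : Int :=
  if _ : a < b then min (pvIdx h a) (pvM h (a + 1) b) else pvIdx h a
termination_by b - a

-- sum of min(h[j..i]) for j = 0..i
def pvPre (h : List Int) (i : ℕ) : Int := ∑ j ∈ Finset.range (i + 1), pvM h j i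
-- sum of min(h[i..j]) for j = i..n-1
def pvSuf (h : List Int) (i : ℕ) : Int := ∑ j ∈ Finset.Ico i h.length, pvM h i j
-- mountain sum with peak i
def pvP (h : List Int) (i : ℕ) : Int := pvPre h i + pvSuf h i - pvIdx h i
-- A's loop-2 candidate at i
def pvCand (h : List Int) (i : ℕ) : Int := pvPre h i + pvSuf h (i + 1)

-- running maxima
def pvAnsAcc (h : List Int) (s0 : Int) : ℕ → Int
  | 0 => max s0 (pvCand h 0)
  | i + 1 => max (pvAnsAcc h s0 i) (pvCand h (i + 1))

def pvBest (h : List Int) : ℕ → Int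
  | 0 => pvP h 0
  | i + 1 => max (pvBest h i) (pvP h (i + 1))

-- prefix-loop stack chain after processing 0..e : head-first stack, bottom -1,
-- each consecutive pair (a above b) covering segment (b, a] with value h[a]
def pvPC (h : List Int) (e : ℕ) : List Int → Prop
  | [a] => a = -1
  | a :: b :: rest => ((-1 ≤ b) ∧ b < a ∧ a ≤ (e : Int) ∧
      (∀ k : Int, b < k → k ≤ a → pvM h k.toNat e = pvIdx h a.toNat)) ∧ pvPC h e (b :: rest)
  | [] => False

-- suffix-loop stack chain after processing e..n-1 : head-first stack, bottom n,
-- each consecutive pair (a above b) covering segment [a, b) with value h[a]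
def pvSC (h : List Int) (e : ℕ) : List Int → Prop
  | [b] => b = (h.length : Int)
  | a :: b :: rest => (a < b ∧ b ≤ (h.length : Int) ∧ (e : Int) ≤ a ∧
      (∀ k : Int, a ≤ k → k < b → pvM h e k.toNat = pvIdx h a.toNat)) ∧ pvSC h e (b :: rest)
  | [] => False

-- partial sums tied to the stack top
def pvSp (h : List Int) (e : ℕ) (t : Int) : Int := ∑ j ∈ Finset.range ((t + 1).toNat), pvM h j e
def pvSs (h : List Int) (e : ℕ) (t : Int) : Int := ∑ j ∈ Finset.Ico (t.toNat) h.length, pvM h e j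

-- ---- basic pvM lemmas ----
lemma pvM_self (h : List Int) (a : ℕ) : pvM h a a = pvIdx h a := by
  rw [pvM]; simp

lemma pvM_succ_left (h : List Int) {a b : ℕ} (hab : a < b) :
    pvM h a b = min (pvIdx h a) (pvM h (a + 1) b) := by
  rw [pvM]; simp [hab]

lemma pvM_succ_right (h : List Int) {a b : ℕ} (hab : a ≤ b) :
    pvM h a (b + 1) = min (pvM h a b) (pvIdx h (b + 1)) := by
  induction hd : b - a generalizing a with
  | zero =>
    have hab2 : a = b := by omega
    subst hab2
    rw [pvM_succ_left h (by omega), pvM_self, pvM_self]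
  | succ d ih =>
    have hab' : a < b := by omega
    rw [pvM_succ_left h (by omega : a < b + 1), pvM_succ_left h hab',
      ih (by omega) (by omega), min_assoc]

lemma pvM_le (h : List Int) {a k b : ℕ} (h1 : a ≤ k) (h2 : k ≤ b) :
    pvM h a b ≤ pvIdx h k := by
  induction hd : b - a generalizing a with
  | zero =>
    have h3 : a = b := by omega
    have h4 : k = b := by omega
    subst h3; subst h4
    rw [pvM_self]
  | succ d ih =>
    have hab : a < b := by omega
    rw [pvM_succ_left h hab]
    rcases eq_or_lt_of_le h1 with rfl | hk
    · exact min_le_left _ _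
    · exact le_trans (min_le_right _ _) (ih hk (by omega))

-- ---- chain structure lemmas ----
lemma pvPC_ne_nil (h : List Int) (e : ℕ) : ¬ pvPC h e [] := by simp [pvPC]

lemma pvPC_head_ge (h : List Int) (e : ℕ) (a : Int) (rest : List Int)
    (hc : pvPC h e (a :: rest)) : -1 ≤ a := by
  match rest with
  | [] => simp only [pvPC] at hc; omega
  | b :: rest' => simp only [pvPC] at hc; omega

lemma pvPC_head_le (h : List Int) (e : ℕ) (a : Int) (rest : List Int)
    (hc : pvPC h e (a :: rest)) : a ≤ (e : Int) := by
  match rest with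
  | [] => simp only [pvPC] at hc; omega
  | b :: rest' => exact hc.1.2.2.1

lemma pvPC_mono (h : List Int) (e : ℕ) (a b : Int) (rest : List Int)
    (hc : pvPC h e (a :: b :: rest)) (hb : 0 ≤ b) :
    pvIdx h b.toNat ≤ pvIdx h a.toNat := by
  obtain ⟨⟨hb1, hba, hae, hseg⟩, hc'⟩ := hc
  match rest with
  | [] => simp only [pvPC] at hc'; omega
  | c :: rest' =>
    obtain ⟨⟨hc1, hcb, hbe, hseg'⟩, _⟩ := hc'
    have hMb : pvM h b.toNat e = pvIdx h b.toNat := hseg' b hcb le_rfl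
    have hMb1 : pvM h (b.toNat + 1) e = pvIdx h a.toNat := by
      have := hseg (b + 1) (by omega) (by omega)
      have ht : (b + 1).toNat = b.toNat + 1 := by omega
      rwa [ht] at this
    have hlt : b.toNat < e := by omega
    rw [pvM_succ_left h hlt, hMb1] at hMb
    omega

-- every element below the head has value ≤ the head's (or is the -1 sentinel)
lemma pvPC_lift (h : List Int) (e : ℕ) (x : Int) (hx : x = pvIdx h (e + 1)) :
    ∀ (st : List Int) (t : Int), pvPC h e (t :: st) →
    (t = -1 ∨ pvIdx h t.toNat < x) →
    pvPC h (e + 1) (t :: st) := by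
  intro st
  induction st with
  | nil => intro t hc _; exact hc
  | cons b rest ih =>
    intro t hc hd
    obtain ⟨⟨hb1, hbt, hte, hseg⟩, hc'⟩ := hc
    have ht0 : 0 ≤ t := by omega
    have htx : pvIdx h t.toNat < x := by
      rcases hd with rfl | hd
      · omega
      · exact hd
    refine ⟨⟨hb1, hbt, by omega, ?_⟩, ?_⟩
    · intro k hk1 hk2
      have hke : k.toNat ≤ e := by omega
      rw [pvM_succ_right h hke, hseg k hk1 hk2, ← hx]
      omega
    · refine ih b hc' ?_
      rcases eq_or_lt_of_le hb1 with hb | hb0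
      · exact Or.inl hb.symm
      · refine Or.inr (lt_of_le_of_lt ?_ htx)
        exact pvPC_mono h e t b rest ⟨⟨hb1, hbt, hte, hseg⟩, hc'⟩ (by omega)

lemma pvSC_head_le (h : List Int) (e : ℕ) (a : Int) (rest : List Int)
    (hc : pvSC h e (a :: rest)) : a ≤ (h.length : Int) := by
  match rest with
  | [] => simp only [pvSC] at hc; omega
  | b :: rest' => simp only [pvSC] at hc; omega

lemma pvSC_mono (h : List Int) (e : ℕ) (a b : Int) (rest : List Int)
    (hc : pvSC h e (a :: b :: rest)) (hb : b < (h.length : Int)) :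
    pvIdx h b.toNat ≤ pvIdx h a.toNat := by
  obtain ⟨⟨hab, hbn, hea, hseg⟩, hc'⟩ := hc
  match rest with
  | [] => simp only [pvSC] at hc'; omega
  | c :: rest' =>
    obtain ⟨⟨hbc, hcn, heb, hseg'⟩, _⟩ := hc'
    have hMb : pvM h e b.toNat = pvIdx h b.toNat := hseg' b le_rfl hbc
    have hMb1 : pvM h e (b.toNat - 1) = pvIdx h a.toNat := by
      have := hseg (b - 1) (by omega) (by omega)
      have ht : (b - 1).toNat = b.toNat - 1 := by omega
      rwa [ht] at this
    have hsplit : b.toNat = (b.toNat - 1) + 1 := by omega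
    rw [hsplit, pvM_succ_right h (by omega), hMb1, ← hsplit] at hMb
    omega

lemma pvSC_lift (h : List Int) (i : ℕ) (x : Int) (hx : x = pvIdx h i) :
    ∀ (st : List Int) (t : Int), pvSC h (i + 1) (t :: st) →
    (t = (h.length : Int) ∨ pvIdx h t.toNat < x) → ((i : Int) + 1 ≤ t) →
    pvSC h i (t :: st) := by
  intro st
  induction st with
  | nil => intro t hc _ _; exact hc
  | cons b rest ih =>
    intro t hc hd hit
    obtain ⟨⟨htb, hbn, het, hseg⟩, hc'⟩ := hc
    have htn : t < (h.length : Int) := by omega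
    have htx : pvIdx h t.toNat < x := by
      rcases hd with rfl | hd
      · omega
      · exact hd
    refine ⟨⟨htb, hbn, by omega, ?_⟩, ?_⟩
    · intro k hk1 hk2
      have hik : i < k.toNat := by omega
      rw [pvM_succ_left h hik, show i + 1 = (i : ℕ) + 1 from rfl]
      have := hseg k hk1 hk2
      rw [this, ← hx]
      omega
    · refine ih b hc' ?_ (by omega)
      rcases eq_or_lt_of_le hbn with hb | hb0
      · exact Or.inl hb
      · refine Or.inr (lt_of_le_of_lt ?_ htx)
        exact pvSC_mono h (i + 1) t b rest ⟨⟨htb, hbn, het, hseg⟩, hc'⟩ hb0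

-- ---- small bridges and sum helpers ----
lemma pvGet_eq (h : List Int) (a : Int) (ha : 0 ≤ a) :
    PySem.List.pyGetD h a 0 = pvIdx h a.toNat := by
  have hc : a = ((a.toNat : ℕ) : Int) := by omega
  rw [hc, PySem.List.pyGetD_natCast]; rfl

lemma pvPopPre_cons (h : List Int) (x j t : Int) (rest : List Int) (s : Int) :
    pvPopPre h x (j :: t :: rest) s =
      if x ≤ PySem.List.pyGetD h j 0 then
        pvPopPre h x (t :: rest) (s - PySem.List.pyGetD h j 0 * (j - t))
      else (j :: t :: rest, s) := by
  rw [pvPopPre]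

lemma pvPopPre_single (h : List Int) (x a s : Int) : pvPopPre h x [a] s = ([a], s) := by
  rw [pvPopPre]
  intro j t rest hcon
  simp at hcon

lemma pvPopSuf_cons (h : List Int) (x j t : Int) (rest : List Int) (s : Int) :
    pvPopSuf h x (j :: t :: rest) s =
      if x ≤ PySem.List.pyGetD h j 0 then
        pvPopSuf h x (t :: rest) (s - PySem.List.pyGetD h j 0 * (t - j))
      else (j :: t :: rest, s) := by
  rw [pvPopSuf]

lemma pvPopSuf_single (h : List Int) (x a s : Int) : pvPopSuf h x [a] s = ([a], s) := by
  rw [pvPopSuf]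
  intro j t rest hcon
  simp at hcon

lemma pvSum_const_seg (f : ℕ → Int) (v : Int) (A B : ℕ) (_hAB : A ≤ B)
    (hv : ∀ j, A ≤ j → j < B → f j = v) :
    ∑ j ∈ Finset.Ico A B, f j = ((B - A : ℕ) : Int) * v := by
  rw [Finset.sum_congr rfl (fun j hj => hv j (Finset.mem_Ico.mp hj).1 (Finset.mem_Ico.mp hj).2),
    Finset.sum_const, Nat.card_Ico, nsmul_eq_mul]

lemma pvSuf_split (h : List Int) (i : ℕ) (hi : i < h.length) :
    pvSuf h i = pvIdx h i + ∑ j ∈ Finset.Ico (i + 1) h.length, pvM h i j := by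
  unfold pvSuf
  rw [Finset.sum_eq_sum_Ico_succ_bot hi, pvM_self]

-- ---- pop-loop specifications ----
lemma pvPopPre_spec (h : List Int) (e : ℕ) (x : Int) (hx : x = pvIdx h (e + 1)) :
    ∀ (st : List Int) (s t0 : Int), pvPC h e st → st.head? = some t0 →
    s = pvSp h e t0 →
    (∀ k : Int, t0 < k → k ≤ (e : Int) + 1 → pvM h k.toNat (e + 1) = x) →
    ∃ t' : Int, (pvPopPre h x st s).1.head? = some t' ∧
      pvPC h e (pvPopPre h x st s).1 ∧
      (pvPopPre h x st s).2 = pvSp h e t' ∧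
      (∀ k : Int, t' < k → k ≤ (e : Int) + 1 → pvM h k.toNat (e + 1) = x) ∧
      (t' = -1 ∨ (0 ≤ t' ∧ pvIdx h t'.toNat < x)) := by
  intro st
  induction st with
  | nil => intro s t0 hc; exact absurd hc (pvPC_ne_nil h e)
  | cons a tail ih =>
    intro s t0 hc hh hs hseg0
    have ht0 : a = t0 := by simpa using hh
    subst ht0
    match tail with
    | [] =>
      have ha : a = -1 := hc
      refine ⟨-1, ?_⟩
      rw [pvPopPre_single, ha]
      exact ⟨rfl, rfl, by rw [hs, ha], by simpa [ha] using hseg0, Or.inl rfl⟩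
    | b :: rest =>
      obtain ⟨⟨hb1, hba, hae, hsegab⟩, hc'⟩ := hc
      have ha0 : 0 ≤ a := by omega
      rw [pvPopPre_cons, pvGet_eq h a ha0]
      by_cases hcond : x ≤ pvIdx h a.toNat
      · rw [if_pos hcond]
        refine ih _ b hc' rfl ?_ ?_
        · -- s - h[a]*(a-b) = pvSp h e b
          have hsplit : ∑ j ∈ Finset.range ((a + 1).toNat), pvM h j e =
              (∑ j ∈ Finset.range ((b + 1).toNat), pvM h j e) +
              ∑ j ∈ Finset.Ico ((b + 1).toNat) ((a + 1).toNat), pvM h j e := by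
            rw [Finset.sum_range_add_sum_Ico _ (by omega : (b + 1).toNat ≤ (a + 1).toNat)]
          have hconst : ∑ j ∈ Finset.Ico ((b + 1).toNat) ((a + 1).toNat), pvM h j e =
              (((a + 1).toNat - (b + 1).toNat : ℕ) : Int) * pvIdx h a.toNat := by
            refine pvSum_const_seg _ _ _ _ (by omega) ?_
            intro j hj1 hj2
            exact hsegab (j : Int) (by omega) (by omega)
          have hcast : (((a + 1).toNat - (b + 1).toNat : ℕ) : Int) = a - b := by omega
          rw [hs]
          unfold pvSp
          rw [hsplit, hconst, hcast]
          ring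
        · intro k hk1 hk2
          by_cases hk : k ≤ a
          · have hke : k.toNat ≤ e := by omega
            rw [pvM_succ_right h hke, hsegab k hk1 hk, ← hx]
            exact min_eq_right hcond
          · exact hseg0 k (by omega) hk2
      · rw [if_neg hcond]
        refine ⟨a, rfl, ⟨⟨hb1, hba, hae, hsegab⟩, hc'⟩, hs, hseg0,
          Or.inr ⟨ha0, by omega⟩⟩

lemma pvPopSuf_spec (h : List Int) (i : ℕ) (x : Int) (hx : x = pvIdx h i) :
    ∀ (st : List Int) (s t0 : Int), pvSC h (i + 1) st → st.head? = some t0 →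
    s = pvSs h (i + 1) t0 →
    (∀ k : Int, (i : Int) ≤ k → k < t0 → pvM h i k.toNat = x) →
    ∃ t' : Int, (pvPopSuf h x st s).1.head? = some t' ∧
      pvSC h (i + 1) (pvPopSuf h x st s).1 ∧
      (pvPopSuf h x st s).2 = pvSs h (i + 1) t' ∧
      (∀ k : Int, (i : Int) ≤ k → k < t' → pvM h i k.toNat = x) ∧
      (t' = (h.length : Int) ∨ ((i : Int) < t' ∧ pvIdx h t'.toNat < x)) := by
  intro st
  induction st with
  | nil => intro s t0 hc; simp [pvSC] at hc
  | cons a tail ih =>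
    intro s t0 hc hh hs hseg0
    have ht0 : a = t0 := by simpa using hh
    subst ht0
    match tail with
    | [] =>
      have ha : a = (h.length : Int) := hc
      refine ⟨(h.length : Int), ?_⟩
      rw [pvPopSuf_single, ha]
      exact ⟨rfl, rfl, by rw [hs, ha], by simpa [ha] using hseg0, Or.inl rfl⟩
    | b :: rest =>
      obtain ⟨⟨hab, hbn, hea, hsegab⟩, hc'⟩ := hc
      have ha0 : 0 ≤ a := by omega
      rw [pvPopSuf_cons, pvGet_eq h a ha0]
      by_cases hcond : x ≤ pvIdx h a.toNat
      · rw [if_pos hcond]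
        refine ih _ b hc' rfl ?_ ?_
        · -- s - h[a]*(b-a) = pvSs h (i+1) b
          have hsplit : ∑ j ∈ Finset.Ico (a.toNat) h.length, pvM h (i + 1) j =
              (∑ j ∈ Finset.Ico (a.toNat) (b.toNat), pvM h (i + 1) j) +
              ∑ j ∈ Finset.Ico (b.toNat) h.length, pvM h (i + 1) j := by
            rw [Finset.sum_Ico_consecutive _ (by omega : a.toNat ≤ b.toNat)
              (by omega : b.toNat ≤ h.length)]
          have hconst : ∑ j ∈ Finset.Ico (a.toNat) (b.toNat), pvM h (i + 1) j =
              ((b.toNat - a.toNat : ℕ) : Int) * pvIdx h a.toNat := by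
            refine pvSum_const_seg _ _ _ _ (by omega) ?_
            intro j hj1 hj2
            exact hsegab (j : Int) (by omega) (by omega)
          have hcast : ((b.toNat - a.toNat : ℕ) : Int) = b - a := by omega
          rw [hs]
          unfold pvSs
          rw [hsplit, hconst, hcast]
          ring
        · intro k hk1 hk2
          by_cases hk : a ≤ k
          · have hik : i < k.toNat := by omega
            rw [pvM_succ_left h hik, show i + 1 = (i : ℕ) + 1 from rfl,
              hsegab k hk hk2, ← hx]
            exact min_eq_left hcond
          · exact hseg0 k hk1 (by omega)
      · rw [if_neg hcond]
        refine ⟨a, rfl, ⟨⟨hab, hbn, hea, hsegab⟩, hc'⟩, hs, hseg0,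
          Or.inr ⟨by omega, by omega⟩⟩

-- ---- recursive models of the three loops ----
def pvIter1 (h : List Int) : ℕ → List Int × Int × List Int
  | 0 => ([(h.length : Int)], 0, [0])
  | k + 1 =>
    let acc := pvIter1 h k
    let i : Int := (h.length : Int) - 1 - (k : Int)
    let x := PySem.List.pyGetD h i 0
    let ps := pvPopSuf h x acc.1 acc.2.1
    let s' := ps.2 + x * (ps.1.headD 0 - i)
    (i :: ps.1, s', s' :: acc.2.2)

def pvIter2 (h su : List Int) (s0 : Int) : ℕ → List Int × Int × Int
  | 0 => ([-1], 0, s0)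
  | k + 1 =>
    let acc := pvIter2 h su s0 k
    let p : Int × Int := ((k : Int), PySem.List.pyGetD h (k : Int) 0)
    let pp := pvPopPre h p.2 acc.1 acc.2.1
    let pre' := pp.2 + p.2 * (p.1 - pp.1.headD 0)
    let ans' := max acc.2.2 (pre' + PySem.List.pyGetD su (p.1 + 1) 0)
    (p.1 :: pp.1, pre', ans')

def pvIterB (h : List Int) : ℕ → Option Int
  | 0 => none
  | k + 1 =>
    let best := pvIterB h k
    let i : Int := (k : Int)
    let x := PySem.List.pyGetD h i 0
    let l := (PySem.List.pyRange (i - 1) (-1) (-1)).foldl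
      (fun (a : Int × Int) j =>
        let cur := min a.1 (PySem.List.pyGetD h j 0)
        (cur, a.2 + cur)) (x, x)
    let r := (PySem.List.pyRange (i + 1) (h.length : Int) 1).foldl
      (fun (a : Int × Int) j =>
        let cur := min a.1 (PySem.List.pyGetD h j 0)
        (cur, a.2 + cur)) (x, l.2)
    match best with
    | none => some r.2
    | some b => if r.2 > b then some r.2 else some b

lemma pvFoldIter {σ α : Type} (step : σ → α → σ) (g : ℕ → α) (init : σ) (F : ℕ → σ)
    (n : ℕ) (h0 : F 0 = init) (hs : ∀ k, k < n → F (k + 1) = step (F k) (g k)) :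
    ((List.range n).map g).foldl step init = F n := by
  induction n with
  | zero => simpa using h0.symm
  | succ m ih =>
    rw [List.range_succ, List.map_append, List.foldl_append,
      ih (fun k hk => hs k (by omega))]
    simpa using (hs m (by omega)).symm

lemma pvPortA_eq (h : List Int) :
    maximumSumOfHeights h =
      (pvIter2 h (pvIter1 h h.length).2.2 (pvIter1 h h.length).2.1 h.length).2.2 := by
  simp only [maximumSumOfHeights]
  have hc : ((h.length : Int) - 1 - (-1)).toNat = h.length := by omega
  rw [PySem.List.pyRange_neg_one, hc,
    pvFoldIter _ _ ([((h.length : Int))], (0 : Int), ([0] : List Int)) (pvIter1 h)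
      h.length rfl (fun k _ => rfl)]
  rw [PySem.List.enumerate_eq_map_pyRange h 0, PySem.List.len_eq,
    PySem.List.pyRange_zero_nat, List.map_map,
    pvFoldIter _ _ (([-1], (0 : Int), (pvIter1 h h.length).2.1) : List Int × Int × Int)
      (pvIter2 h (pvIter1 h h.length).2.2 (pvIter1 h h.length).2.1)
      h.length rfl (fun k _ => rfl)]

lemma pvPortB_eq (h : List Int) :
    maximumSumOfHeights_alt h = (pvIterB h h.length).getD 0 := by
  simp only [maximumSumOfHeights_alt]
  rw [PySem.List.pyRange_zero_nat,
    pvFoldIter _ _ (none : Option Int) (pvIterB h) h.length rfl (fun k _ => rfl)]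

-- ---- loop invariants ----
lemma pvIter1_inv (h : List Int) : ∀ k, k ≤ h.length →
    (pvIter1 h k).1.head? = some ((h.length - k : ℕ) : Int) ∧
    pvSC h (h.length - k) (pvIter1 h k).1 ∧
    (pvIter1 h k).2.1 = pvSuf h (h.length - k) ∧
    (pvIter1 h k).2.2 = (List.range k).map (fun t => pvSuf h (h.length - k + t)) ++ [0] := by
  intro k
  induction k with
  | zero =>
    intro _
    refine ⟨by simp [pvIter1], ?_, by simp [pvIter1, pvSuf], by simp [pvIter1]⟩
    show pvSC h (h.length - 0) [(h.length : Int)]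
    exact rfl
  | succ k ih =>
    intro hk
    obtain ⟨hh, hc, hs, hacc⟩ := ih (by omega)
    have hE : h.length - k = (h.length - k - 1) + 1 := by omega
    rw [hE] at hh hc hs hacc
    have hstep : pvIter1 h (k + 1) =
        (((h.length : Int) - 1 - (k : Int)) ::
            (pvPopSuf h (PySem.List.pyGetD h ((h.length : Int) - 1 - (k : Int)) 0)
              (pvIter1 h k).1 (pvIter1 h k).2.1).1,
          (pvPopSuf h (PySem.List.pyGetD h ((h.length : Int) - 1 - (k : Int)) 0)
              (pvIter1 h k).1 (pvIter1 h k).2.1).2 +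
            PySem.List.pyGetD h ((h.length : Int) - 1 - (k : Int)) 0 *
              ((pvPopSuf h (PySem.List.pyGetD h ((h.length : Int) - 1 - (k : Int)) 0)
                  (pvIter1 h k).1 (pvIter1 h k).2.1).1.headD 0 -
                ((h.length : Int) - 1 - (k : Int))),
          ((pvPopSuf h (PySem.List.pyGetD h ((h.length : Int) - 1 - (k : Int)) 0)
              (pvIter1 h k).1 (pvIter1 h k).2.1).2 +
            PySem.List.pyGetD h ((h.length : Int) - 1 - (k : Int)) 0 *
              ((pvPopSuf h (PySem.List.pyGetD h ((h.length : Int) - 1 - (k : Int)) 0)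
                  (pvIter1 h k).1 (pvIter1 h k).2.1).1.headD 0 -
                ((h.length : Int) - 1 - (k : Int)))) :: (pvIter1 h k).2.2) := rfl
    have hiZ : (h.length : Int) - 1 - (k : Int) = ((h.length - k - 1 : ℕ) : Int) := by omega
    have hX : PySem.List.pyGetD h ((h.length - k - 1 : ℕ) : Int) 0 =
        pvIdx h (h.length - k - 1) := by
      rw [PySem.List.pyGetD_natCast]; rfl
    have hsS : (pvIter1 h k).2.1 =
        pvSs h ((h.length - k - 1) + 1) (((h.length - k - 1) + 1 : ℕ) : Int) := by
      rw [hs]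
      unfold pvSuf pvSs
      rw [Int.toNat_natCast]
    have hseg0 : ∀ kk : Int, ((h.length - k - 1 : ℕ) : Int) ≤ kk →
        kk < (((h.length - k - 1) + 1 : ℕ) : Int) →
        pvM h (h.length - k - 1) kk.toNat = pvIdx h (h.length - k - 1) := by
      intro kk h1 h2
      have hkk : kk = ((h.length - k - 1 : ℕ) : Int) := by
        push_cast at h2
        omega
      subst hkk
      rw [Int.toNat_natCast, pvM_self]
    obtain ⟨t', hht', hct', hst', hseg', hdisj⟩ :=
      pvPopSuf_spec h (h.length - k - 1) (pvIdx h (h.length - k - 1)) rfl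
        (pvIter1 h k).1 (pvIter1 h k).2.1 (((h.length - k - 1) + 1 : ℕ) : Int) hc hh hsS hseg0
    rcases hP : (pvPopSuf h (pvIdx h (h.length - k - 1)) (pvIter1 h k).1
        (pvIter1 h k).2.1).1 with _ | ⟨t'', rest⟩
    · rw [hP] at hht'; simp at hht'
    · rw [hP] at hht' hct'
      have ht'' : t' = t'' := (by simpa using hht' : t'' = t').symm
      subst ht''
      have hTn : t' ≤ (h.length : Int) := pvSC_head_le h _ t' rest hct'
      have hIt : ((h.length - k - 1 : ℕ) : Int) < t' := by
        rcases hdisj with rfl | ⟨hlt, _⟩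
        · omega
        · exact hlt
      have hs'' : (pvPopSuf h (pvIdx h (h.length - k - 1)) (pvIter1 h k).1
            (pvIter1 h k).2.1).2 +
          pvIdx h (h.length - k - 1) * (t' - ((h.length - k - 1 : ℕ) : Int)) =
          pvSuf h (h.length - k - 1) := by
        rw [hst']
        have hsplit : pvSuf h (h.length - k - 1) =
            (∑ j ∈ Finset.Ico (h.length - k - 1) t'.toNat, pvM h (h.length - k - 1) j) +
            ∑ j ∈ Finset.Ico t'.toNat h.length, pvM h (h.length - k - 1) j := by
          unfold pvSuf
          rw [Finset.sum_Ico_consecutive _ (by omega) (by omega)]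
        have hpart1 : ∑ j ∈ Finset.Ico (h.length - k - 1) t'.toNat,
            pvM h (h.length - k - 1) j =
            ((t'.toNat - (h.length - k - 1) : ℕ) : Int) * pvIdx h (h.length - k - 1) := by
          refine pvSum_const_seg _ _ _ _ (by omega) (fun j hj1 hj2 => ?_)
          exact hseg' (j : Int) (by omega) (by omega)
        have hpart2 : ∑ j ∈ Finset.Ico t'.toNat h.length, pvM h (h.length - k - 1) j =
            pvSs h ((h.length - k - 1) + 1) t' := by
          unfold pvSs
          refine Finset.sum_congr rfl (fun j hj => ?_)
          obtain ⟨hj1, hj2⟩ := Finset.mem_Ico.mp hj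
          rcases hdisj with rfl | ⟨hlt, htx⟩
          · omega
          · have hij : (h.length - k - 1) < j := by omega
            rw [pvM_succ_left h hij]
            refine min_eq_right ?_
            exact le_trans (pvM_le h (by omega : (h.length - k - 1) + 1 ≤ t'.toNat)
              (by omega : t'.toNat ≤ j)) (le_of_lt htx)
        have hcnt : ((t'.toNat - (h.length - k - 1) : ℕ) : Int) *
            pvIdx h (h.length - k - 1) =
            pvIdx h (h.length - k - 1) * (t' - ((h.length - k - 1 : ℕ) : Int)) := by
          rw [show ((t'.toNat - (h.length - k - 1) : ℕ) : Int) =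
            t' - ((h.length - k - 1 : ℕ) : Int) from by omega]
          ring
        rw [hsplit, hpart1, hpart2, hcnt]
        ring
      rw [hstep]
      simp only [hiZ, hX, hP, List.headD_cons]
      have hI' : h.length - (k + 1) = h.length - k - 1 := by omega
      rw [hI']
      refine ⟨by simp, ?_, hs'', ?_⟩
      · -- new chain
        refine ⟨⟨hIt, hTn, le_rfl, ?_⟩, ?_⟩
        · intro kk hk1 hk2
          rw [hseg' kk hk1 hk2, Int.toNat_natCast]
        · refine pvSC_lift h (h.length - k - 1) (pvIdx h (h.length - k - 1)) rfl rest t'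
            hct' ?_ (by omega)
          rcases hdisj with rfl | ⟨_, htx⟩
          · exact Or.inl rfl
          · exact Or.inr htx
      · -- the suffix array accumulator
        rw [hacc, List.range_succ_eq_map, List.map_cons, List.map_map]
        simp only [List.cons_append]
        refine congrArg₂ _ ?_ ?_
        · rw [hs'']
          exact congrArg (pvSuf h) (by omega)
        · refine congrArg₂ _ ?_ rfl
          refine List.map_congr_left (fun t _ => ?_)
          exact congrArg (pvSuf h) (by omega)

lemma pvSufLookup (h : List Int) (j : ℕ) (hj : j ≤ h.length) :
    PySem.List.pyGetD ((List.range h.length).map (pvSuf h) ++ [0]) (j : Int) 0 = pvSuf h j := by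
  rw [PySem.List.pyGetD_natCast]
  rcases Nat.lt_or_ge j h.length with hj2 | hj2
  · rw [List.getD_eq_getElem?_getD, List.getElem?_append_left (by simpa using hj2)]
    simp [hj2]
  · have hjn : j = h.length := by omega
    subst hjn
    rw [List.getD_eq_getElem?_getD, List.getElem?_append_right (by simp)]
    simp [pvSuf]

lemma pvIter2_inv (h : List Int) (s0 : Int)
    (su : List Int) (hsu : su = (List.range h.length).map (pvSuf h) ++ [0]) :
    ∀ k, 1 ≤ k → k ≤ h.length →
    (pvIter2 h su s0 k).1.head? = some ((k - 1 : ℕ) : Int) ∧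
    pvPC h (k - 1) (pvIter2 h su s0 k).1 ∧
    (pvIter2 h su s0 k).2.1 = pvPre h (k - 1) ∧
    (pvIter2 h su s0 k).2.2 = pvAnsAcc h s0 (k - 1) := by
  intro k
  induction k with
  | zero => intro h1 _; exact absurd h1 (by omega)
  | succ m ih =>
    intro _ hk
    have hstep : pvIter2 h su s0 (m + 1) =
        ((m : Int) ::
            (pvPopPre h (PySem.List.pyGetD h (m : Int) 0) (pvIter2 h su s0 m).1
              (pvIter2 h su s0 m).2.1).1,
          (pvPopPre h (PySem.List.pyGetD h (m : Int) 0) (pvIter2 h su s0 m).1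
              (pvIter2 h su s0 m).2.1).2 +
            PySem.List.pyGetD h (m : Int) 0 *
              ((m : Int) -
                (pvPopPre h (PySem.List.pyGetD h (m : Int) 0) (pvIter2 h su s0 m).1
                    (pvIter2 h su s0 m).2.1).1.headD 0),
          max (pvIter2 h su s0 m).2.2
            ((pvPopPre h (PySem.List.pyGetD h (m : Int) 0) (pvIter2 h su s0 m).1
                  (pvIter2 h su s0 m).2.1).2 +
              PySem.List.pyGetD h (m : Int) 0 *
                ((m : Int) -
                  (pvPopPre h (PySem.List.pyGetD h (m : Int) 0) (pvIter2 h su s0 m).1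
                      (pvIter2 h su s0 m).2.1).1.headD 0) +
              PySem.List.pyGetD su ((m : Int) + 1) 0)) := rfl
    have hxm : PySem.List.pyGetD h ((m : ℕ) : Int) 0 = pvIdx h m := by
      rw [PySem.List.pyGetD_natCast]; rfl
    have hlook : PySem.List.pyGetD su ((m : Int) + 1) 0 = pvSuf h (m + 1) := by
      rw [hsu, show ((m : ℕ) : Int) + 1 = ((m + 1 : ℕ) : Int) from by omega]
      exact pvSufLookup h (m + 1) (by omega)
    rcases Nat.eq_zero_or_pos m with rfl | hm1
    · -- first iteration: stack [-1], no pops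
      rw [hstep]
      simp only [pvIter2, pvPopPre_single, hxm, hlook]
      have hpre0 : pvPre h 0 = pvIdx h 0 := by simp [pvPre, pvM_self]
      refine ⟨by simp, ?_, ?_, ?_⟩
      · refine ⟨⟨by omega, by simp, by simp, ?_⟩, rfl⟩
        intro kk hk1 hk2
        have hkk : kk = 0 := by omega
        subst hkk
        show pvM h 0 0 = pvIdx h (((0 : ℕ) : Int)).toNat
        rw [pvM_self]
        rfl
      · show 0 + pvIdx h 0 * (((0 : ℕ) : Int) - (-1)) = pvPre h (0 + 1 - 1)
        rw [hpre0]
        norm_num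
      · show max s0 (0 + pvIdx h 0 * (((0 : ℕ) : Int) - (-1)) + pvSuf h (0 + 1)) =
          pvAnsAcc h s0 (0 + 1 - 1)
        have : pvAnsAcc h s0 (0 + 1 - 1) = max s0 (pvPre h 0 + pvSuf h (0 + 1)) := rfl
        rw [this, hpre0]
        norm_num
    · obtain ⟨m', rfl⟩ : ∃ m', m = m' + 1 := ⟨m - 1, by omega⟩
      obtain ⟨hh, hc, hp, ha⟩ := ih (by omega) (by omega)
      simp only [Nat.add_sub_cancel] at hh hc hp ha
      have hcast : ((m' + 1 : ℕ) : Int) = (m' : Int) + 1 := by push_cast; ring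
      have hx : PySem.List.pyGetD h ((m' + 1 : ℕ) : Int) 0 = pvIdx h (m' + 1) := by
        rw [PySem.List.pyGetD_natCast]; rfl
      have hs' : (pvIter2 h su s0 (m' + 1)).2.1 = pvSp h m' ((m' : ℕ) : Int) := by
        rw [hp]
        unfold pvPre pvSp
        rw [show ((((m' : ℕ) : Int)) + 1).toNat = m' + 1 from by omega]
      have hseg0 : ∀ kk : Int, ((m' : ℕ) : Int) < kk → kk ≤ (m' : Int) + 1 →
          pvM h kk.toNat (m' + 1) = pvIdx h (m' + 1) := by
        intro kk h1 h2
        have hkk : kk = (m' : Int) + 1 := by omega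
        subst hkk
        rw [show (((m' : Int)) + 1).toNat = m' + 1 from by omega, pvM_self]
      obtain ⟨t', hht', hct', hst', hseg', hdisj⟩ :=
        pvPopPre_spec h m' (pvIdx h (m' + 1)) rfl (pvIter2 h su s0 (m' + 1)).1
          (pvIter2 h su s0 (m' + 1)).2.1 ((m' : ℕ) : Int) hc hh hs' hseg0
      rcases hP : (pvPopPre h (pvIdx h (m' + 1)) (pvIter2 h su s0 (m' + 1)).1
          (pvIter2 h su s0 (m' + 1)).2.1).1 with _ | ⟨t'', rest⟩
      · rw [hP] at hht'; simp at hht'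
      · rw [hP] at hht' hct'
        have ht'' : t' = t'' := (by simpa using hht' : t'' = t').symm
        subst ht''
        have hT1 : -1 ≤ t' := pvPC_head_ge h m' t' rest hct'
        have hT2 : t' ≤ (m' : Int) := pvPC_head_le h m' t' rest hct'
        -- the new prefix sum
        have hpre : (pvPopPre h (pvIdx h (m' + 1)) (pvIter2 h su s0 (m' + 1)).1
              (pvIter2 h su s0 (m' + 1)).2.1).2 +
            pvIdx h (m' + 1) * (((m' + 1 : ℕ) : Int) - t') = pvPre h (m' + 1) := by
          rw [hst']
          have hsplit : pvPre h (m' + 1) =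
              (∑ j ∈ Finset.range ((t' + 1).toNat), pvM h j (m' + 1)) +
              ∑ j ∈ Finset.Ico ((t' + 1).toNat) (m' + 1 + 1), pvM h j (m' + 1) := by
            unfold pvPre
            rw [Finset.sum_range_add_sum_Ico _ (by omega : (t' + 1).toNat ≤ m' + 1 + 1)]
          have hpart1 : ∑ j ∈ Finset.range ((t' + 1).toNat), pvM h j (m' + 1) =
              pvSp h m' t' := by
            unfold pvSp
            refine Finset.sum_congr rfl (fun j hj => ?_)
            have hjt : (j : Int) ≤ t' := by
              have := Finset.mem_range.mp hj; omega
            have hjm : j ≤ m' := by omega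
            rw [pvM_succ_right h hjm]
            rcases hdisj with rfl | ⟨ht0, htx⟩
            · omega
            · refine min_eq_left (le_trans (pvM_le h (by omega : j ≤ t'.toNat) (by omega))
                (le_of_lt htx))
          have hpart2 : ∑ j ∈ Finset.Ico ((t' + 1).toNat) (m' + 1 + 1), pvM h j (m' + 1) =
              ((m' + 1 + 1 - (t' + 1).toNat : ℕ) : Int) * pvIdx h (m' + 1) := by
            refine pvSum_const_seg _ _ _ _ (by omega) (fun j hj1 hj2 => ?_)
            exact hseg' (j : Int) (by omega) (by omega)
          have hcnt : ((m' + 1 + 1 - (t' + 1).toNat : ℕ) : Int) * pvIdx h (m' + 1) =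
              pvIdx h (m' + 1) * (((m' + 1 : ℕ) : Int) - t') := by
            rw [show ((m' + 1 + 1 - (t' + 1).toNat : ℕ) : Int) =
              ((m' + 1 : ℕ) : Int) - t' from by omega]
            ring
          rw [hsplit, hpart1, hpart2, hcnt]
        rw [hstep]
        simp only [hx, hP, List.headD_cons, hlook, Nat.add_sub_cancel]
        refine ⟨by simp, ?_, ?_, ?_⟩
        · -- new chain
          refine ⟨⟨by omega, by omega, by simp, ?_⟩, ?_⟩
          · intro kk hk1 hk2
            rw [hcast] at hk2
            have := hseg' kk hk1 hk2
            rw [this, show (((m' + 1 : ℕ) : Int)).toNat = m' + 1 from by omega]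
          · have hlift := pvPC_lift h m' (pvIdx h (m' + 1)) rfl rest t' hct' ?_
            · exact hlift
            · rcases hdisj with rfl | ⟨_, htx⟩
              · exact Or.inl rfl
              · exact Or.inr htx
        · exact hpre
        · rw [ha, hpre]
          rfl

lemma pvLeftLoop (h : List Int) (i : ℕ) (_hi : i < h.length) : ∀ k, k ≤ i →
    ((List.range k).map (fun (j : ℕ) => (i : Int) - 1 - (j : Int))).foldl
      (fun (a : Int × Int) j =>
        let cur := min a.1 (PySem.List.pyGetD h j 0)
        (cur, a.2 + cur)) (pvIdx h i, pvIdx h i)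
    = (pvM h (i - k) i, ∑ j ∈ Finset.Ico (i - k) (i + 1), pvM h j i) := by
  intro k
  induction k with
  | zero =>
    intro _
    simp only [List.range_zero, List.map_nil, List.foldl_nil, Nat.sub_zero]
    rw [Finset.sum_Ico_succ_top (by omega), Finset.Ico_self, Finset.sum_empty,
      zero_add, pvM_self]
  | succ k ih =>
    intro hk
    rw [List.range_succ, List.map_append, List.foldl_append, ih (by omega)]
    have hj : ((i : Int) - 1 - (k : Int)) = ((i - k - 1 : ℕ) : Int) := by omega
    have hsk : i - k - 1 + 1 = i - k := by omega
    have hsk2 : i - (k + 1) = i - k - 1 := by omega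
    have hcur : min (pvM h (i - k) i) (pvIdx h (i - k - 1)) = pvM h (i - k - 1) i := by
      rw [pvM_succ_left h (by omega : i - k - 1 < i), hsk, min_comm]
    have hsum : ∑ j ∈ Finset.Ico (i - k - 1) (i + 1), pvM h j i =
        pvM h (i - k - 1) i + ∑ j ∈ Finset.Ico (i - k) (i + 1), pvM h j i := by
      rw [Finset.sum_eq_sum_Ico_succ_bot (by omega), hsk]
    simp only [List.map_cons, List.map_nil, List.foldl_cons, List.foldl_nil, hj,
      PySem.List.pyGetD_natCast, hsk2]
    rw [hsum]
    have hidx : (h.getD (i - k - 1) 0) = pvIdx h (i - k - 1) := rfl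
    rw [hidx, hcur]
    exact Prod.ext rfl (by ring)

lemma pvRightLoop (h : List Int) (i : ℕ) (init2 : Int) :
    ∀ k, k ≤ h.length - 1 - i →
    ((List.range k).map (fun (j : ℕ) => (i : Int) + 1 + (j : Int))).foldl
      (fun (a : Int × Int) j =>
        let cur := min a.1 (PySem.List.pyGetD h j 0)
        (cur, a.2 + cur)) (pvIdx h i, init2)
    = (pvM h i (i + k), init2 + ∑ j ∈ Finset.Ico (i + 1) (i + k + 1), pvM h i j) := by
  intro k
  induction k with
  | zero =>
    intro _
    simp only [List.range_zero, List.map_nil, List.foldl_nil, pvM_self,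
      Finset.Ico_self, Finset.sum_empty, add_zero]
  | succ k ih =>
    intro hk
    rw [List.range_succ, List.map_append, List.foldl_append, ih (by omega)]
    have hj : ((i : Int) + 1 + (k : Int)) = ((i + k + 1 : ℕ) : Int) := by omega
    have ha : i + (k + 1) = i + k + 1 := by omega
    have hb : i + (k + 1) + 1 = (i + k + 1) + 1 := by omega
    have hcur : min (pvM h i (i + k)) (pvIdx h (i + k + 1)) = pvM h i (i + k + 1) := by
      rw [pvM_succ_right h (by omega : i ≤ i + k)]
    have hsum : ∑ j ∈ Finset.Ico (i + 1) ((i + k + 1) + 1), pvM h i j =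
        (∑ j ∈ Finset.Ico (i + 1) (i + k + 1), pvM h i j) + pvM h i (i + k + 1) := by
      rw [Finset.sum_Ico_succ_top (by omega)]
    simp only [List.map_cons, List.map_nil, List.foldl_cons, List.foldl_nil, hj,
      PySem.List.pyGetD_natCast, ha]
    rw [hsum]
    have hidx : (h.getD (i + k + 1) 0) = pvIdx h (i + k + 1) := rfl
    rw [hidx, hcur]
    exact Prod.ext rfl (by ring)

lemma pvIterB_inv (h : List Int) : ∀ k, k ≤ h.length → 1 ≤ k →
    pvIterB h k = some (pvBest h (k - 1)) := by
  intro k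
  induction k with
  | zero => intro _ h1; omega
  | succ m ih =>
    intro hk _
    have hm : m < h.length := by omega
    show pvIterB h (m + 1) = _
    rw [pvIterB]
    have hcL : ((m : Int) - 1 - (-1)).toNat = m := by omega
    have hx : PySem.List.pyGetD h ((m : ℕ) : Int) 0 = pvIdx h m := by
      rw [PySem.List.pyGetD_natCast]; rfl
    simp only [hx, PySem.List.pyRange_neg_one, hcL, PySem.List.pyRange_one]
    have hcR : (((h.length : Int)) - ((m : Int) + 1)).toNat = h.length - 1 - m := by omega
    rw [hcR, pvLeftLoop h m hm m le_rfl,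
      pvRightLoop h m _ (h.length - 1 - m) le_rfl]
    have hL2 : ∑ j ∈ Finset.Ico (m - m) (m + 1), pvM h j m = pvPre h m := by
      rw [Nat.sub_self, pvPre, Finset.range_eq_Ico]
    have hR2 : (∑ j ∈ Finset.Ico (m - m) (m + 1), pvM h j m) +
        ∑ j ∈ Finset.Ico (m + 1) (m + (h.length - 1 - m) + 1), pvM h m j = pvP h m := by
      rw [hL2, show m + (h.length - 1 - m) + 1 = h.length from by omega]
      have := pvSuf_split h m hm
      unfold pvP
      omega
    rw [hR2]
    rcases Nat.eq_zero_or_pos m with hm0 | hm1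
    · subst hm0
      rw [pvIterB]
      rfl
    · rw [ih (by omega) hm1]
      have hmb : m = (m - 1) + 1 := by omega
      have : (if pvP h m > pvBest h (m - 1) then some (pvP h m) else some (pvBest h (m - 1)))
          = some (pvBest h m) := by
        rw [hmb, pvBest]
        rw [← hmb]
        split_ifs with hgt
        · rw [max_eq_right (by omega)]
        · rw [max_eq_left (by omega)]
      simpa using this

-- ---- the max-exchange argument ----
lemma pvPre_succ (h : List Int) (i : ℕ) (hup : pvIdx h i ≤ pvIdx h (i + 1)) :
    pvPre h (i + 1) = pvPre h i + pvIdx h (i + 1) := by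
  unfold pvPre
  rw [Finset.sum_range_succ, pvM_self]
  congr 1
  refine Finset.sum_congr rfl (fun j hj => ?_)
  have hji : j ≤ i := by
    have := Finset.mem_range.mp hj; omega
  rw [pvM_succ_right h hji]
  exact min_eq_left (le_trans (pvM_le h hji le_rfl) hup)

lemma pvCand_mono (h : List Int) (i : ℕ) (h1 : i + 1 < h.length)
    (hup : pvIdx h i ≤ pvIdx h (i + 1)) : pvCand h i ≤ pvCand h (i + 1) := by
  unfold pvCand
  have hb : i + 1 + 1 = i + 2 := by omega
  rw [pvPre_succ h i hup, hb]
  have hsuf : pvSuf h (i + 1) ≤ pvIdx h (i + 1) + pvSuf h (i + 2) := by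
    rw [pvSuf_split h (i + 1) h1, hb]
    have hs : ∑ j ∈ Finset.Ico (i + 2) h.length, pvM h (i + 1) j ≤
        ∑ j ∈ Finset.Ico (i + 2) h.length, pvM h (i + 2) j := by
      refine Finset.sum_le_sum (fun j hj => ?_)
      have hij : i + 1 < j := by
        have := (Finset.mem_Ico.mp hj).1; omega
      rw [pvM_succ_left h hij, hb]
      exact min_le_right _ _
    unfold pvSuf
    omega
  omega

lemma pvCand_eq_P (h : List Int) (i : ℕ) (hi : i < h.length)
    (hdesc : i + 1 = h.length ∨ pvIdx h (i + 1) < pvIdx h i) : pvCand h i = pvP h i := by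
  unfold pvCand pvP
  have hkey : pvSuf h (i + 1) = pvSuf h i - pvIdx h i := by
    rw [pvSuf_split h i hi]
    have : ∑ j ∈ Finset.Ico (i + 1) h.length, pvM h i j =
        ∑ j ∈ Finset.Ico (i + 1) h.length, pvM h (i + 1) j := by
      refine Finset.sum_congr rfl (fun j hj => ?_)
      obtain ⟨hj1, hj2⟩ := Finset.mem_Ico.mp hj
      rcases hdesc with hd | hd
      · omega
      · rw [pvM_succ_left h (by omega : i < j)]
        exact min_eq_right (le_trans (pvM_le h (le_refl (i + 1)) hj1) (le_of_lt hd))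
    unfold pvSuf
    omega
  omega

lemma pvP_le_cand (h : List Int) (i : ℕ) (hi : i < h.length) : pvP h i ≤ pvCand h i := by
  unfold pvP pvCand
  have hkey : pvSuf h i - pvIdx h i ≤ pvSuf h (i + 1) := by
    rw [pvSuf_split h i hi]
    have : ∑ j ∈ Finset.Ico (i + 1) h.length, pvM h i j ≤
        ∑ j ∈ Finset.Ico (i + 1) h.length, pvM h (i + 1) j := by
      refine Finset.sum_le_sum (fun j hj => ?_)
      have hij : i < j := (Finset.mem_Ico.mp hj).1
      rw [pvM_succ_left h hij]
      exact min_le_right _ _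
    unfold pvSuf
    omega
  omega

lemma pvSuf0_le_cand0 (h : List Int) (hn : 0 < h.length) : pvSuf h 0 ≤ pvCand h 0 := by
  have h1 := pvP_le_cand h 0 hn
  unfold pvP at h1
  have h00 : pvPre h 0 = pvIdx h 0 := by
    simp [pvPre, pvM_self]
  omega

lemma pvBest_ge (h : List Int) : ∀ k i, i ≤ k → pvP h i ≤ pvBest h k := by
  intro k
  induction k with
  | zero => intro i hi; interval_cases i; exact le_refl _
  | succ m ih =>
    intro i hi
    rcases Nat.lt_or_ge i (m + 1) with hlt | hge
    · exact le_trans (ih i (by omega)) (le_max_left _ _)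
    · have : i = m + 1 := by omega
      subst this
      exact le_max_right _ _

lemma pvCand_le_best (h : List Int) (hn : 0 < h.length) :
    ∀ i, i < h.length → pvCand h i ≤ pvBest h (h.length - 1) := by
  intro i
  induction hd : h.length - 1 - i generalizing i with
  | zero =>
    intro hi
    have : i = h.length - 1 := by omega
    rw [pvCand_eq_P h i hi (Or.inl (by omega))]
    exact pvBest_ge h _ i (by omega)
  | succ d ih =>
    intro hi
    have hi1 : i + 1 < h.length := by omega
    rcases lt_or_ge (pvIdx h (i + 1)) (pvIdx h i) with hdn | hup
    · rw [pvCand_eq_P h i hi (Or.inr hdn)]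
      exact pvBest_ge h _ i (by omega)
    · exact le_trans (pvCand_mono h i hi1 hup) (ih (i + 1) (by omega) hi1)

lemma pvAnsAcc_le_best (h : List Int) (s0 : Int) (hn : 0 < h.length)
    (hs0 : s0 ≤ pvBest h (h.length - 1)) :
    ∀ k, k ≤ h.length - 1 → pvAnsAcc h s0 k ≤ pvBest h (h.length - 1) := by
  intro k
  induction k with
  | zero =>
    intro _
    exact max_le hs0 (pvCand_le_best h hn 0 hn)
  | succ m ih =>
    intro hk
    exact max_le (ih (by omega)) (pvCand_le_best h hn (m + 1) (by omega))

lemma pvBest_le_ansAcc (h : List Int) (s0 : Int) : ∀ k, k < h.length →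
    pvBest h k ≤ pvAnsAcc h s0 k := by
  intro k
  induction k with
  | zero =>
    intro hk
    exact le_trans (pvP_le_cand h 0 hk) (le_max_right _ _)
  | succ m ih =>
    intro hk
    exact max_le_max (ih (by omega)) (pvP_le_cand h (m + 1) hk)

lemma pvAnsAcc_eq_best (h : List Int) (hn : 0 < h.length) :
    pvAnsAcc h (pvSuf h 0) (h.length - 1) = pvBest h (h.length - 1) := by
  refine le_antisymm ?_ (pvBest_le_ansAcc h _ _ (by omega))
  refine pvAnsAcc_le_best h _ hn ?_ _ le_rfl
  exact le_trans (pvSuf0_le_cand0 h hn) (pvCand_le_best h hn 0 hn)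

-- ===== VERDICT =====
theorem maximumSumOfHeights_spec : Claim_equal_maximumSumOfHeights := by
  intro h _
  unfold Spec_maximumSumOfHeights
  rcases Nat.eq_zero_or_pos h.length with hn | hn
  · have h0 : h = [] := List.length_eq_zero_iff.mp hn
    subst h0
    decide
  · rw [pvPortA_eq, pvPortB_eq]
    have h1 := pvIter1_inv h h.length le_rfl
    rw [Nat.sub_self] at h1
    have hsu : (pvIter1 h h.length).2.2 = (List.range h.length).map (pvSuf h) ++ [0] := by
      rw [h1.2.2.2]
      congr 1
      exact List.map_congr_left (fun t _ => by rw [Nat.zero_add])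
    have h2 := pvIter2_inv h (pvIter1 h h.length).2.1 (pvIter1 h h.length).2.2 hsu
      h.length hn le_rfl
    rw [h2.2.2.2, h1.2.2.1, pvIterB_inv h h.length le_rfl hn]
    rw [pvAnsAcc_eq_best h hn]
    rfl
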